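-- pv_equiv track=rewrite | github.com/Samy42/PianoCapstone | Data Analysis/Pieces.py | checkPiece
-- ===== SOURCE A (Python) =====
-- def checkPiece(correct, notes):
--
--
--     iterlist = correct.copy()
--
--     same = 0
--     for i in iterlist:
--         if i in notes:
--             notes.remove(i)
--             correct.remove(i)
--             same = same + 1
--
--
--     return [[same, len(notes), len(correct)],notes,correct]
-- ===== SOURCE B (Python) =====
-- def checkPiece(correct, notes):
--     # One linear pass with a frequency table instead of A's quadratic membership/remove loop.
--     # Mutates correct and notes in place (via slice assignment) like A does.
--     rem = {}
--     for y in notes: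
--         rem[y] = rem.get(y, 0) + 1
--     same = 0
--     kept = []
--     for x in correct:
--         if rem.get(x, 0) > 0:
--             rem[x] = rem[x] - 1
--             same = same + 1
--         else:
--             kept.append(x)
--     removed = {}
--     for y in notes:
--         removed[y] = removed.get(y, 0) + 1
--     for y in rem:
--         removed[y] = removed[y] - rem[y]
--     new_notes = []
--     for y in notes:
--         if removed.get(y, 0) > 0:
--             removed[y] = removed[y] - 1
--         else:
--             new_notes.append(y)
--     correct[:] = kept
--     notes[:] = new_notes
--     return [[same, len(notes), len(correct)], notes, correct]
-- ===== Notes on version B (the rewrite author's own statement) =====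
-- stated objective: faster
-- what changed: Replaces A's quadratic loop (list membership test plus two list.remove calls per element) with a frequency-table algorithm: one dict of note counts consumed in a single pass over correct, then one pass over notes dropping the first removed[x] occurrences of each matched value.
import Mathlib
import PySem

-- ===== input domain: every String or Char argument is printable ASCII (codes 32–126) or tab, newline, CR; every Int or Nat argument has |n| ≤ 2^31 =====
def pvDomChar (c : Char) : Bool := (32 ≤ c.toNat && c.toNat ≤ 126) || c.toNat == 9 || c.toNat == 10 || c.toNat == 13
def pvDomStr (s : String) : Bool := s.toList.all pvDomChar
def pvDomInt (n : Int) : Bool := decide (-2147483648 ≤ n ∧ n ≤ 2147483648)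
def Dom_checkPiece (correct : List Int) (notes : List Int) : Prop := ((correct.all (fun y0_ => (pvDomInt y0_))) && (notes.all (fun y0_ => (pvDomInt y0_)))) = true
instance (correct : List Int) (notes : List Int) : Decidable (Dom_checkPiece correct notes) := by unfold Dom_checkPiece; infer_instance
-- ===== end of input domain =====

-- B replaces A's quadratic membership/remove loop by one linear pass over a frequency table plus a
-- rebuild pass for the leftover notes; equivalence proved for the RETURN value (both Pythons also
-- mutate `correct`/`notes` in place to the same final contents).

-- ===== PORT A =====
-- the for-loop over iterlist with state (correct, notes, same); `.getD` is exact: the remove is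
-- guarded by `i in notes` (and, provably, i is then present in correct too), so Python never raises
def checkPieceLoop (iter : List Int) (correct : List Int) (notes : List Int) (same : Int) :
    Int × List Int × List Int :=
  match iter with
  | [] => (same, notes, correct)
  | i :: rest =>
    if notes.contains i then
      checkPieceLoop rest ((PySem.List.remove? correct i).getD correct)
        ((PySem.List.remove? notes i).getD notes) (same + 1)
    else
      checkPieceLoop rest correct notes same

def checkPiece (correct : List Int) (notes : List Int) : List (List Int) :=
  let r := checkPieceLoop correct correct notes 0
  [[r.1, PySem.List.len r.2.1, PySem.List.len r.2.2], r.2.1, r.2.2]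

-- ===== PORT B =====
-- rem[y] = rem.get(y, 0) + 1 loop
def altCount (l : List Int) : PySem.Dict Int Int :=
  l.foldl (fun d y => d.insert y (d.getD y 0 + 1)) PySem.Dict.empty

-- the `for x in correct` pass; python reads rem[x] only when rem.get(x,0) > 0, so getD is exact
def altPass (correct : List Int) (rem : PySem.Dict Int Int) :
    PySem.Dict Int Int × Int × List Int :=
  correct.foldl
    (fun st x =>
      if st.1.getD x 0 > 0 then (st.1.insert x (st.1.getD x 0 - 1), st.2.1 + 1, st.2.2)
      else (st.1, st.2.1, st.2.2 ++ [x]))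
    (rem, 0, [])

-- `for y in rem: removed[y] = removed[y] - rem[y]`; removed has every key of rem, so getD is exact
def altSub (keys : List Int) (rem : PySem.Dict Int Int) (removed : PySem.Dict Int Int) :
    PySem.Dict Int Int :=
  keys.foldl (fun d y => d.insert y (d.getD y 0 - rem.getD y 0)) removed

-- the `for y in notes` rebuild pass
def altRebuild (notes : List Int) (removed : PySem.Dict Int Int) :
    PySem.Dict Int Int × List Int :=
  notes.foldl
    (fun st y =>
      if st.1.getD y 0 > 0 then (st.1.insert y (st.1.getD y 0 - 1), st.2)
      else (st.1, st.2 ++ [y]))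
    (removed, [])

def checkPiece_alt (correct : List Int) (notes : List Int) : List (List Int) :=
  let rem0 := altCount notes
  let p := altPass correct rem0
  let rem := p.1
  let same := p.2.1
  let kept := p.2.2
  let removed := altSub rem.keys rem (altCount notes)
  let newNotes := (altRebuild notes removed).2
  [[same, PySem.List.len newNotes, PySem.List.len kept], newNotes, kept]

-- ===== PRECONDITION & SPEC =====
def Spec_checkPiece (correct : List Int) (notes : List Int) (out : List (List Int)) : Prop := out = checkPiece_alt correct notes
instance (correct : List Int) (notes : List Int) (out : List (List Int)) : Decidable (Spec_checkPiece correct notes out) := by unfold Spec_checkPiece; infer_instance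

-- ===== CLAIM (what is proved, stated in full; the proofs are below) =====
def Claim_equal_checkPiece : Prop := ∀ (correct : List Int) (notes : List Int), Dom_checkPiece correct notes → Spec_checkPiece correct notes (checkPiece correct notes)

-- ===== LEMMAS AND PROOFS =====

-- ghost reference: the greedy left-to-right matching (added matches, final notes, kept correct)
def greedy : List Int → List Int → Int × List Int × List Int
  | [], ns => (0, ns, [])
  | i :: r, ns =>
    if ns.contains i then
      let g := greedy r (ns.erase i); (g.1 + 1, g.2.1, g.2.2)
    else
      let g := greedy r ns; (g.1, g.2.1, i :: g.2.2)

-- ghost: drop the first f x occurrences of each value x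
def decF (f : Int → Nat) (i : Int) : Int → Nat := fun x => if x = i then f x - 1 else f x
def incF (f : Int → Nat) (i : Int) : Int → Nat := fun x => if x = i then f x + 1 else f x

def dropC (f : Int → Nat) : List Int → List Int
  | [] => []
  | y :: t => if f y > 0 then dropC (decF f y) t else y :: dropC f t

theorem dropC_zero (l : List Int) : dropC (fun _ => 0) l = l := by
  induction l with
  | nil => rfl
  | cons y t ih => simp [dropC, ih]

theorem count_dropC (f : Int → Nat) (l : List Int) (x : Int) :
    (dropC f l).count x = l.count x - min (f x) (l.count x) := by
  induction l generalizing f with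
  | nil => simp [dropC]
  | cons y t ih =>
    have hyx : y ≠ x ↔ ¬ x = y := by constructor <;> (intro h h2; exact h h2.symm)
    simp only [dropC]
    split_ifs with h
    · rw [ih]
      by_cases hxy : x = y
      · have hd : decF f y x = f x - 1 := by subst hxy; simp [decF]
        subst hxy
        rw [hd]
        simp only [List.count_cons_self]
        omega
      · have hd : decF f y x = f x := by simp [decF, hxy]
        rw [hd]
        rw [List.count_cons_of_ne (hyx.mpr hxy)]
    · by_cases hxy : x = y
      · subst hxy
        simp only [List.count_cons_self, ih]
        omega
      · rw [List.count_cons_of_ne (hyx.mpr hxy), List.count_cons_of_ne (hyx.mpr hxy), ih]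

theorem dropC_ext (f g : Int → Nat) (l : List Int)
    (h : ∀ x, min (f x) (l.count x) = min (g x) (l.count x)) :
    dropC f l = dropC g l := by
  induction l generalizing f g with
  | nil => rfl
  | cons y t ih =>
    have hy := h y
    rw [List.count_cons_self] at hy
    simp only [dropC]
    by_cases hf : f y > 0
    · have hg : g y > 0 := by omega
      rw [if_pos hf, if_pos hg]
      apply ih
      intro x
      by_cases hxy : x = y
      · subst hxy
        simp [decF]
        omega
      · have hx := h x
        rw [List.count_cons_of_ne (fun h2 => hxy h2.symm)] at hx
        simp only [decF, if_neg hxy]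
        exact hx
    · have hg : ¬ g y > 0 := by omega
      rw [if_neg hf, if_neg hg]
      congr 1
      apply ih
      intro x
      by_cases hxy : x = y
      · subst hxy; omega
      · have hx := h x
        rw [List.count_cons_of_ne (fun h2 => hxy h2.symm)] at hx
        exact hx

theorem erase_dropC (f : Int → Nat) (l : List Int) (i : Int) (h : i ∈ dropC f l) :
    (dropC f l).erase i = dropC (incF f i) l := by
  induction l generalizing f with
  | nil => simp [dropC] at h
  | cons y t ih =>
    simp only [dropC] at h ⊢
    by_cases hf : f y > 0
    · rw [if_pos hf] at h ⊢
      have hi : incF f i y > 0 := by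
        by_cases hiy : y = i <;> simp [incF, hiy] <;> omega
      rw [if_pos hi]
      rw [ih (decF f y) h]
      congr 1
      funext x
      by_cases hxy : x = y
      · subst hxy
        by_cases hxi : x = i
        · subst hxi
          simp [incF, decF]
          omega
        · simp [incF, decF, hxi]
      · by_cases hxi : x = i
        · subst hxi
          simp [incF, decF, fun h2 => hxy h2 ]
        · simp [incF, decF, hxy, hxi]
    · rw [if_neg hf] at h ⊢
      by_cases hiy : i = y
      · subst hiy
        rw [List.erase_cons_head]
        have hi : incF f i i > 0 := by simp [incF]
        rw [if_pos hi]
        congr 1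
        funext x
        by_cases hxi : x = i <;> simp [incF, decF, hxi]
      · have hne : ¬ (y == i) = true := by simp; exact fun h2 => hiy h2.symm
        rw [List.erase_cons_tail hne]
        have h2 : i ∈ dropC f t := by
          rcases List.mem_cons.mp h with h3 | h3
          · exact absurd h3 hiy
          · exact h3
        rw [ih f h2]
        have hi : ¬ incF f i y > 0 := by
          have : incF f i y = f y := by
            have : ¬ y = i := fun h2 => hiy h2.symm
            simp [incF, this]
          omega
        rw [if_neg hi]

theorem greedy_dropC (it : List Int) (l : List Int) :
    ∀ f, ∃ f', (greedy it (dropC f l)).2.1 = dropC f' l := by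
  induction it with
  | nil => intro f; exact ⟨f, rfl⟩
  | cons i r ih =>
    intro f
    by_cases h : (dropC f l).contains i
    · have hm : i ∈ dropC f l := by simpa using h
      simp only [greedy, if_pos h]
      rw [erase_dropC f l i hm]
      exact ih (incF f i)
    · simp only [greedy, if_neg h]
      exact ih f

-- A's loop computes greedy
theorem loopA_spec (it : List Int) :
    ∀ (kept ns : List Int) (s : Int), (∀ x ∈ kept, ns.count x = 0) →
    checkPieceLoop it (kept ++ it) ns s =
      (s + (greedy it ns).1, (greedy it ns).2.1, kept ++ (greedy it ns).2.2) := by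
  induction it with
  | nil => intro kept ns s _; simp [checkPieceLoop, greedy]
  | cons i rest ih =>
    intro kept ns s hk
    by_cases h : ns.contains i
    · have hm : i ∈ ns := List.contains_iff_mem.mp h
      have hik : i ∉ kept := by
        intro hmem
        have := hk i hmem
        have := List.count_pos_iff.mpr hm
        omega
      have hcor : (PySem.List.remove? (kept ++ i :: rest) i).getD (kept ++ i :: rest) = kept ++ rest := by
        rw [PySem.List.remove?_eq_some_erase _ i (by simp)]
        rw [Option.getD_some, List.erase_append_right _ hik, List.erase_cons_head]
      have hns : (PySem.List.remove? ns i).getD ns = ns.erase i := by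
        rw [PySem.List.remove?_eq_some_erase _ i hm, Option.getD_some]
      simp only [checkPieceLoop, if_pos h, hcor, hns]
      rw [ih kept (ns.erase i) (s + 1) (by
        intro x hx
        have := hk x hx
        rw [List.count_erase]
        omega)]
      simp only [greedy, if_pos h]
      refine Prod.ext (by omega) rfl
    · simp only [checkPieceLoop, if_neg h]
      have : kept ++ i :: rest = (kept ++ [i]) ++ rest := by simp
      rw [this]
      rw [ih (kept ++ [i]) ns s (by
        intro x hx
        rcases List.mem_append.mp hx with h1 | h1
        · exact hk x h1
        · have : x = i := by simpa using h1
          subst this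
          exact List.count_eq_zero.mpr (fun hm => h (List.contains_iff_mem.mpr hm)))]
      simp only [greedy, if_neg h]
      simp

-- B's main pass computes greedy
theorem altPass_spec (it : List Int) :
    ∀ (ns : List Int) (rem : PySem.Dict Int Int) (s : Int) (kept : List Int),
    (∀ x, rem.getD x 0 = (ns.count x : Int)) →
    let r := it.foldl
      (fun st x =>
        if st.1.getD x 0 > 0 then (st.1.insert x (st.1.getD x 0 - 1), st.2.1 + 1, st.2.2)
        else (st.1, st.2.1, st.2.2 ++ [x])) (rem, s, kept)
    r.2.1 = s + (greedy it ns).1 ∧ r.2.2 = kept ++ (greedy it ns).2.2 ∧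
      (∀ x, r.1.getD x 0 = ((greedy it ns).2.1.count x : Int)) ∧ r.1.keys = rem.keys := by
  induction it with
  | nil =>
    intro ns rem s kept h
    refine ⟨by simp [greedy], by simp [greedy], fun x => h x, rfl⟩
  | cons i r ih =>
    intro ns rem s kept h
    by_cases hc : ns.contains i
    · have hm : i ∈ ns := List.contains_iff_mem.mp hc
      have hpos : rem.getD i 0 > 0 := by
        rw [h i]
        exact_mod_cast List.count_pos_iff.mpr hm
      have hcont : rem.contains i = true := by
        by_contra hc2
        have := PySem.Dict.getD_of_not_contains rem (0 : Int) (by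
          cases h2 : rem.contains i
          · rfl
          · exact absurd h2 hc2)
        omega
      simp only [List.foldl_cons, if_pos hpos]
      have h' : ∀ x, (rem.insert i (rem.getD i 0 - 1)).getD x 0 = ((ns.erase i).count x : Int) := by
        intro x
        rw [PySem.Dict.getD_insert, List.count_erase]
        by_cases hxi : x = i
        · subst hxi
          rw [if_pos rfl, h x]
          have : List.count x ns ≥ 1 := List.count_pos_iff.mpr hm
          simp only [BEq.rfl]
          push_cast
          omega
        · rw [if_neg hxi, h x]
          have : ¬ ((x == i) = true) := by simpa using hxi
          have hne : ¬ ((i == x) = true) := by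
            simp only [beq_iff_eq]
            intro h2; exact hxi h2.symm
          rw [if_neg hne]
          simp
      obtain ⟨h1, h2, h3, h4⟩ := ih (ns.erase i) (rem.insert i (rem.getD i 0 - 1)) (s + 1) kept h'
      simp only [greedy, if_pos hc]
      refine ⟨by rw [h1]; omega, h2, h3, by rw [h4, PySem.Dict.keys_insert_of_contains rem _ hcont]⟩
    · have hcnt : List.count i ns = 0 := List.count_eq_zero.mpr (fun hm => hc (List.contains_iff_mem.mpr hm))
      have hneg : ¬ rem.getD i 0 > 0 := by rw [h i, hcnt]; omega
      simp only [List.foldl_cons, if_neg hneg]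
      obtain ⟨h1, h2, h3, h4⟩ := ih ns rem s (kept ++ [i]) h
      simp only [greedy, if_neg hc]
      exact ⟨h1, by rw [h2]; simp, h3, h4⟩

theorem altSub_getD (keys : List Int) (hnd : keys.Nodup) (rem : PySem.Dict Int Int)
    (removed : PySem.Dict Int Int) (x : Int) :
    (altSub keys rem removed).getD x 0 =
      if x ∈ keys then removed.getD x 0 - rem.getD x 0 else removed.getD x 0 := by
  induction keys generalizing removed with
  | nil => simp [altSub]
  | cons y K ih =>
    have hynK : y ∉ K := (List.nodup_cons.mp hnd).1
    have hK : K.Nodup := (List.nodup_cons.mp hnd).2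
    simp only [altSub, List.foldl_cons]
    rw [show (K.foldl (fun d y => d.insert y (d.getD y 0 - rem.getD y 0))
        (removed.insert y (removed.getD y 0 - rem.getD y 0))) =
        altSub K rem (removed.insert y (removed.getD y 0 - rem.getD y 0)) from rfl]
    rw [ih hK]
    by_cases hxK : x ∈ K
    · have hxy : x ≠ y := fun h2 => hynK (h2 ▸ hxK)
      rw [if_pos hxK, if_pos (List.mem_cons.mpr (Or.inr hxK)),
        PySem.Dict.getD_insert_of_ne _ _ _ hxy]
    · rw [if_neg hxK]
      by_cases hxy : x = y
      · subst hxy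
        rw [if_pos (List.mem_cons.mpr (Or.inl rfl)), PySem.Dict.getD_insert_self]
      · rw [if_neg (by simp [hxy, hxK]), PySem.Dict.getD_insert_of_ne _ _ _ hxy]

theorem altRebuild_spec (l : List Int) :
    ∀ (removed : PySem.Dict Int Int) (acc : List Int) (f : Int → Nat),
    (∀ x, removed.getD x 0 = (f x : Int)) →
    (l.foldl
      (fun st y =>
        if st.1.getD y 0 > 0 then (st.1.insert y (st.1.getD y 0 - 1), st.2)
        else (st.1, st.2 ++ [y])) (removed, acc)).2 = acc ++ dropC f l := by
  induction l with
  | nil => intro removed acc f _; simp [dropC]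
  | cons y t ih =>
    intro removed acc f h
    simp only [List.foldl_cons, dropC]
    by_cases hf : f y > 0
    · have hpos : removed.getD y 0 > 0 := by rw [h y]; exact_mod_cast hf
      rw [if_pos hf, if_pos hpos]
      exact ih _ acc (decF f y) (by
        intro x
        rw [PySem.Dict.getD_insert]
        by_cases hxy : x = y
        · subst hxy
          rw [if_pos rfl, h x]
          simp only [decF]
          push_cast
          omega
        · rw [if_neg hxy, h x]
          simp [decF, hxy])
    · have hneg : ¬ removed.getD y 0 > 0 := by rw [h y]; exact_mod_cast hf
      rw [if_neg hf, if_neg hneg]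
      rw [ih _ (acc ++ [y]) f h]
      simp

-- ===== VERDICT (by name: the statement is the Claim_ definition above) =====
theorem checkPiece_spec : Claim_equal_checkPiece := by
  intro correct notes _
  show checkPiece correct notes = checkPiece_alt correct notes
  have hA := loopA_spec correct [] notes 0 (by intro x hx; simp at hx)
  have hA' : checkPieceLoop correct correct notes 0 =
      ((greedy correct notes).1, (greedy correct notes).2.1, (greedy correct notes).2.2) := by
    simpa using hA
  have hcounter : altCount notes = PySem.Dict.counter notes :=
    PySem.Dict.foldl_insert_getD_add_one_eq_counter notes
  have hcnt : ∀ x, (altCount notes).getD x 0 = (List.count x notes : Int) := by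
    intro x; rw [hcounter]; exact PySem.Dict.getD_counter notes x
  have hkeys : (altCount notes).keys = PySem.Set.ofList notes := by
    rw [hcounter]; exact PySem.Dict.keys_counter notes
  obtain ⟨h1, h2, h3, h4⟩ := altPass_spec correct notes (altCount notes) 0 [] hcnt
  have h1' : (altPass correct (altCount notes)).2.1 = (greedy correct notes).1 := by
    simpa [altPass] using h1
  have h2' : (altPass correct (altCount notes)).2.2 = (greedy correct notes).2.2 := by
    simpa [altPass] using h2
  have h3' : ∀ x, (altPass correct (altCount notes)).1.getD x 0 =
      ((greedy correct notes).2.1.count x : Int) := by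
    simpa [altPass] using h3
  have h4' : (altPass correct (altCount notes)).1.keys = PySem.Set.ofList notes := by
    have : (altPass correct (altCount notes)).1.keys = (altCount notes).keys := by
      simpa [altPass] using h4
    rw [this, hkeys]
  obtain ⟨f', hf'⟩ := greedy_dropC correct notes (fun _ => 0)
  rw [dropC_zero] at hf'
  have hle : ∀ x, List.count x (greedy correct notes).2.1 ≤ List.count x notes := by
    intro x; rw [hf', count_dropC]; omega
  have hrem : ∀ x, (altSub (PySem.Set.ofList notes) (altPass correct (altCount notes)).1
      (altCount notes)).getD x 0 =
      ((fun x => List.count x notes - List.count x (greedy correct notes).2.1) x : Int) := by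
    intro x
    rw [altSub_getD _ (PySem.Set.nodup_ofList notes)]
    by_cases hx : x ∈ PySem.Set.ofList notes
    · rw [if_pos hx, hcnt x, h3' x]
      have := hle x
      beta_reduce
      omega
    · rw [if_neg hx, hcnt x]
      have hxm : x ∉ notes := fun hm => hx ((PySem.Set.mem_ofList notes x).mpr hm)
      have hc0 : List.count x notes = 0 := List.count_eq_zero.mpr hxm
      have := hle x
      simp [hc0]
  have hreb := altRebuild_spec notes
    (altSub (PySem.Set.ofList notes) (altPass correct (altCount notes)).1 (altCount notes)) []
    (fun x => List.count x notes - List.count x (greedy correct notes).2.1) hrem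
  have hdrop : dropC (fun x => List.count x notes - List.count x (greedy correct notes).2.1) notes
      = (greedy correct notes).2.1 := by
    rw [hf']
    apply dropC_ext
    intro x
    have h5 := count_dropC f' notes x
    omega
  have hB : checkPiece_alt correct notes =
      [[(greedy correct notes).1, PySem.List.len (greedy correct notes).2.1,
        PySem.List.len (greedy correct notes).2.2], (greedy correct notes).2.1,
        (greedy correct notes).2.2] := by
    show (let rem0 := altCount notes
          let p := altPass correct rem0
          let rem := p.1
          let same := p.2.1
          let kept := p.2.2
          let removed := altSub rem.keys rem (altCount notes)
          let newNotes := (altRebuild notes removed).2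
          [[same, PySem.List.len newNotes, PySem.List.len kept], newNotes, kept]) = _
    simp only
    rw [h1', h2', h4']
    have : (altRebuild notes (altSub (PySem.Set.ofList notes)
        (altPass correct (altCount notes)).1 (altCount notes))).2 =
        [] ++ dropC (fun x => List.count x notes - List.count x (greedy correct notes).2.1) notes := by
      simpa [altRebuild] using hreb
    rw [this, hdrop]
    simp
  rw [hB]
  simp only [checkPiece]
  rw [hA']
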